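-- pv_equiv track=rewrite | github.com/HaydeePeruyero/2023-mexico-testing-and-debugging | hands_on/local_maxima/local_maxima.py | local_maxima
-- ===== SOURCE A (Python) =====
-- def local_maxima(x):
--     """Find local maxima of x.
--
--     Input arguments:
--     x -- 1D list of real numbers
--
--     Output:
--     idx -- list of indices of the local maxima in x
--     """
--     sort_x = sorted(x, reverse=True)
--     list_original = x
--     maximum = []
--     index_m = []
--     for i in range(2):
--     	maximum.append(list_original.index(sort_x[i]))
--
--     return maximum
-- ===== SOURCE B (Python) =====
-- def local_maxima(x):
--     """Find local maxima of x.
--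
--     Input arguments:
--     x -- 1D list of real numbers
--
--     Output:
--     idx -- list of indices of the local maxima in x
--     """
--     m1 = max(x)
--     i1 = x.index(m1)
--     m2 = max(x[:i1] + x[i1 + 1:])
--     return [i1, x.index(m2)]
-- ===== Notes on version B (the rewrite author's own statement) =====
-- stated objective: alternative
-- what changed: Instead of fully sorting the list in descending order and looking up the indices of the first two sorted elements, B takes the maximum, removes its first occurrence, takes the maximum of the remainder, and looks up both first indices, with no sorting.
import Mathlib
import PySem

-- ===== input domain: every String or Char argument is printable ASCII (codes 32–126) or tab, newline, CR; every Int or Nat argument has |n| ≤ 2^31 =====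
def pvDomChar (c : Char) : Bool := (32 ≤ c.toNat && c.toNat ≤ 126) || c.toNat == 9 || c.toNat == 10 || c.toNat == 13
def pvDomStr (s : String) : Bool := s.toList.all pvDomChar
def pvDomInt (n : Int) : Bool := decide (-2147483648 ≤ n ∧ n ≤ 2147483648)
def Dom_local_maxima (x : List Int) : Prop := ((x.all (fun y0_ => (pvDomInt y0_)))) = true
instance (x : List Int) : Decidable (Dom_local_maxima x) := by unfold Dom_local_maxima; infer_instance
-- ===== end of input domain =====

-- B replaces A's full descending sort with two maximum passes (max, then max of the list
-- with the first occurrence of the maximum removed) and first-index lookups: same return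
-- value on every list of length ≥ 2, no sorting.


-- ===== PORT A =====
-- sort_x = sorted(x, reverse=True); then for i in range(2): maximum.append(x.index(sort_x[i])).
-- sort_x[i] / x.index(...) raise on lists shorter than 2; those inputs are excluded by
-- Pre_local_maxima, so the port uses .getD 0 there.
def local_maxima (x : List Int) : List Int :=
  let sort_x := PySem.List.sorted x (fun v => v) true
  let list_original := x
  let maximum : List Int := (PySem.List.pyRange 0 2 1).foldl
    (fun acc i =>
      acc ++ [(((PySem.List.pyGet? sort_x i).bind
        (fun v => PySem.List.index? list_original v)).map Int.ofNat).getD 0]) []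
  maximum

-- ===== PORT B =====
-- m1 = max(x); i1 = x.index(m1); m2 = max(x[:i1] + x[i1+1:]); return [i1, x.index(m2)].
-- max([]) / x[0] would raise below length 2 (outside Pre_); the port uses .getD 0 there.
def local_maxima_alt (x : List Int) : List Int :=
  let m1 := (PySem.List.max? x (fun v => v)).getD 0
  let i1 := ((PySem.List.index? x m1).map Int.ofNat).getD 0
  let m2 := (PySem.List.max?
      (PySem.List.slice x none (some i1) ++ PySem.List.slice x (some (i1 + 1)) none)
      (fun v => v)).getD 0
  [i1, ((PySem.List.index? x m2).map Int.ofNat).getD 0]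

-- ===== PRECONDITION & SPEC =====
-- Python A raises IndexError (sort_x[1]) on lists of length < 2; exactly those are excluded.
def Pre_local_maxima (x : List Int) : Prop := 2 ≤ x.length
instance (x : List Int) : Decidable (Pre_local_maxima x) := by unfold Pre_local_maxima; infer_instance
def pvWitness_local_maxima : List Int := ([3, 1, 2])

def Spec_local_maxima (x : List Int) (out : List Int) : Prop := out = local_maxima_alt x
instance (x : List Int) (out : List Int) : Decidable (Spec_local_maxima x out) := by unfold Spec_local_maxima; infer_instance

-- ===== CLAIM (what is proved, stated in full; the proofs are below) =====
def Claim_equal_local_maxima : Prop := ∀ (x : List Int), Dom_local_maxima x → Pre_local_maxima x → Spec_local_maxima x (local_maxima x)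

-- ===== LEMMAS AND PROOFS =====

theorem local_maxima_eq (x : List Int) (h2 : 2 ≤ x.length) :
    local_maxima x = local_maxima_alt x := by
  -- decompose the sorted list
  obtain ⟨h0, h1, t, hst⟩ : ∃ h0 h1 t,
      PySem.List.sorted x (fun v => v) true = h0 :: h1 :: t := by
    have hlen : (PySem.List.sorted x (fun v => v) true).length = x.length :=
      PySem.List.length_sorted x _ _
    match hs : PySem.List.sorted x (fun v => v) true, hlen with
    | [], hlen => simp at hlen; omega
    | [a], hlen => simp at hlen; omega
    | a :: b :: t, _ => exact ⟨a, b, t, rfl⟩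
  have hperm : (PySem.List.sorted x (fun v => v) true).Perm x := PySem.List.sorted_perm x _ _
  have hmax : ∀ y ∈ x, y ≤ h0 := PySem.List.key_head_sorted_rev_ge x (fun v => v) hst
  have h0mem : h0 ∈ x := hperm.subset (by rw [hst]; exact List.mem_cons_self ..)
  -- m1 = h0
  obtain ⟨m1, hm1⟩ : ∃ m, PySem.List.max? x (fun v => v) = some m := by
    cases hm : PySem.List.max? x (fun v => v) with
    | none => rw [PySem.List.max?_eq_none_iff] at hm; simp [hm] at h2
    | some m => exact ⟨m, rfl⟩
  have hm1x : m1 ∈ x := PySem.List.max?_mem hm1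
  have hm1max : ∀ y ∈ x, y ≤ m1 := PySem.List.max?_isMax hm1
  have hm1h0 : m1 = h0 := le_antisymm (hmax m1 hm1x) (hm1max h0 h0mem)
  -- first index of h0
  obtain ⟨k, hk⟩ : ∃ k, PySem.List.index? x h0 = some k := by
    have := (PySem.List.index?_isSome_iff x h0).mpr h0mem
    exact Option.isSome_iff_exists.mp this
  obtain ⟨pre, suf, hx, hkl, hnp⟩ := (PySem.List.index?_eq_some_iff x h0 k).mp hk
  -- B's remainder is pre ++ suf
  have hslice1 : PySem.List.slice x none (some ((k : Nat) : Int)) = pre := by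
    rw [PySem.List.slice_to_natCast, hx, ← hkl, List.take_left]
  have hslice2 : PySem.List.slice x (some (((k : Nat) : Int) + 1)) none = suf := by
    have : ((k : Nat) : Int) + 1 = ((k + 1 : Nat) : Int) := by push_cast; ring
    rw [this, PySem.List.slice_from_natCast, hx, ← hkl]
    have hd := List.drop_length_add_append (l₁ := pre) (l₂ := h0 :: suf) 1
    simpa using hd
  -- the remainder is a permutation of h1 :: t
  have herase : x.erase h0 = pre ++ suf := by
    rw [hx, List.erase_append_right _ hnp, List.erase_cons_head]
  have hperm2 : (h1 :: t).Perm (pre ++ suf) := by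
    have := hperm.erase h0
    rwa [hst, List.erase_cons_head, herase] at this
  -- h1 bounds the remainder
  have hpw : (PySem.List.sorted x (fun v => v) true).Pairwise (fun a b => b ≤ a) :=
    PySem.List.sorted_pairwise_rev x _
  have hh1max : ∀ y ∈ pre ++ suf, y ≤ h1 := by
    intro y hy
    have hy' : y ∈ h1 :: t := (hperm2.mem_iff).mpr hy
    rw [hst] at hpw
    rcases List.mem_cons.mp hy' with rfl | hyt
    · exact le_refl _
    · exact (List.pairwise_cons.mp (List.pairwise_cons.mp hpw).2).1 y hyt
  have hh1mem : h1 ∈ pre ++ suf := (hperm2.mem_iff).mp (List.mem_cons_self ..)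
  -- m2 = h1
  obtain ⟨m2, hm2⟩ : ∃ m, PySem.List.max? (pre ++ suf) (fun v => v) = some m := by
    cases hm : PySem.List.max? (pre ++ suf) (fun v => v) with
    | none => rw [PySem.List.max?_eq_none_iff] at hm; rw [hm] at hh1mem; simp at hh1mem
    | some m => exact ⟨m, rfl⟩
  have hm2h1 : m2 = h1 :=
    le_antisymm (hh1max m2 (PySem.List.max?_mem hm2))
      (PySem.List.max?_isMax hm2 h1 hh1mem)
  -- evaluate both sides
  have hrange : PySem.List.pyRange 0 2 1 = [0, 1] := by decide
  have hget0 : PySem.List.pyGet? (PySem.List.sorted x (fun v => v) true) 0 = some h0 := by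
    rw [hst]; exact PySem.List.pyGet?_zero_cons ..
  have hget1 : PySem.List.pyGet? (PySem.List.sorted x (fun v => v) true) 1 = some h1 := by
    rw [hst]
    have : (1 : Int) = ((1 : Nat) : Int) := rfl
    rw [this, PySem.List.pyGet?_natCast]
    rfl
  simp only [local_maxima, local_maxima_alt, Int.ofNat_eq_natCast, hrange, List.foldl, hget0, hget1,
    hm1, Option.getD_some, hm1h0, hk, Option.map_some, hslice1, hslice2, hm2, hm2h1,
    Option.bind_some, List.nil_append, List.singleton_append]

-- ===== VERDICT (by name: the statement is the Claim_ definition above) =====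
theorem local_maxima_spec : Claim_equal_local_maxima := by
  intro x _ hpre
  unfold Spec_local_maxima
  exact local_maxima_eq x hpre
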